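-- pv_equiv track=rewrite | github.com/tn3w/is-crawler | is_crawler/__init__.py | _url_in_ua
-- ===== SOURCE A (Python) =====
-- def _url_in_ua(ua: str) -> bool:
--     for marker in ("http://", "https://"):
--         i = 0
--         while (i := ua.find(marker, i)) != -1:
--             if i == 0 or ua[i - 1] in "+;" or (i >= 3 and ua[i - 3 : i] == " - "):
--                 return True
--             i += 1
--     return False
-- ===== SOURCE B (Python) =====
-- def _url_in_ua(ua: str) -> bool:
--     if ua.startswith(("http://", "https://")):
--         return True
--     return any(
--         (ua[j - 1] in "+;" or (j >= 3 and ua[j - 3:j] == " - "))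
--         and (ua.startswith("http://", j) or ua.startswith("https://", j))
--         for j in range(1, len(ua))
--     )
-- ===== Notes on version B (the rewrite author's own statement) =====
-- stated objective: simpler
-- what changed: Replaces the per-marker repeated .find scans with manual index restarts by a single left-to-right pass over positions that checks the accepting context first and the two markers as prefixes at that position.
import Mathlib
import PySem

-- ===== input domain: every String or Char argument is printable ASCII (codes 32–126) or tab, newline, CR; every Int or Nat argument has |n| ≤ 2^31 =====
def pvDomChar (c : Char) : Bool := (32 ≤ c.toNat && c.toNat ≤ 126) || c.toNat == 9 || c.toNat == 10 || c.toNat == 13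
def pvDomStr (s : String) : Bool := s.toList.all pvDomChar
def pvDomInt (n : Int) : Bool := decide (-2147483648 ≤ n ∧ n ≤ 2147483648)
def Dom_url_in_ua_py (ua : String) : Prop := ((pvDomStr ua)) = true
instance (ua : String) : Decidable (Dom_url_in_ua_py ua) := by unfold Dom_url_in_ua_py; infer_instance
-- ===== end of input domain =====

-- B replaces A's per-marker .find loops by one position pass (context first, markers as prefixes); objective: simpler.

-- ===== PORT A =====
-- ua.find(marker, i): smallest j ≥ i with marker a prefix of ua[j:] (the markers are nonempty), else none (Python's -1)
def pvFindFrom (s pat : List Char) (i : Nat) : Option Nat :=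
  if i > s.length then none
  else if pat.isPrefixOf (s.drop i) then some i
  else pvFindFrom s pat (i + 1)
termination_by s.length + 1 - i

-- A's if-condition: i == 0 or ua[i-1] in "+;" or (i >= 3 and ua[i-3:i] == " - ")
def pvCondA (s : List Char) (j : Nat) : Bool :=
  if j = 0 then true
  else if s[j-1]? = some '+' || s[j-1]? = some ';' then true
  else decide (3 ≤ j) && decide ((s.drop (j-3)).take 3 = [' ', '-', ' '])

-- A's while loop for one marker; fuel = s.length + 1 bounds the strictly advancing restarts
def pvLoopA (s pat : List Char) (fuel i : Nat) : Bool :=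
  match fuel with
  | 0 => false
  | fuel + 1 =>
    match pvFindFrom s pat i with
    | none => false
    | some j => if pvCondA s j then true else pvLoopA s pat fuel (j + 1)

def url_in_ua_py (ua : String) : Bool :=
  let s := ua.toList
  [['h','t','t','p',':','/','/'], ['h','t','t','p','s',':','/','/']].any
    (fun pat => pvLoopA s pat (s.length + 1) 0)

-- ===== PORT B =====
-- ua.startswith(("http://", "https://"), j)
def pvHitB (s : List Char) (j : Nat) : Bool :=
  List.isPrefixOf ['h','t','t','p',':','/','/'] (s.drop j) ||
  List.isPrefixOf ['h','t','t','p','s',':','/','/'] (s.drop j)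

-- ua[j-1] in "+;" or (j >= 3 and ua[j-3:j] == " - ")
def pvCondB (s : List Char) (j : Nat) : Bool :=
  (s[j-1]? = some '+' || s[j-1]? = some ';') ||
  (decide (3 ≤ j) && decide ((s.drop (j-3)).take 3 = [' ', '-', ' ']))

def url_in_ua_py_alt (ua : String) : Bool :=
  let s := ua.toList
  pvHitB s 0 || (List.range' 1 (s.length - 1)).any (fun j => pvCondB s j && pvHitB s j)

-- ===== PRECONDITION & SPEC =====
def Spec_url_in_ua_py (ua : String) (out : Bool) : Prop := out = url_in_ua_py_alt ua
instance (ua : String) (out : Bool) : Decidable (Spec_url_in_ua_py ua out) := by unfold Spec_url_in_ua_py; infer_instance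

-- ===== CLAIM (what is proved, stated in full; the proofs are below) =====
def Claim_equal_url_in_ua_py : Prop := ∀ (ua : String), Dom_url_in_ua_py ua → Spec_url_in_ua_py ua (url_in_ua_py ua)

-- ===== LEMMAS AND PROOFS =====

theorem pv_no_prefix_past_end {s pat : List Char} {k : Nat} (hp : pat ≠ [])
    (hk : s.length ≤ k) : ¬ pat <+: s.drop k := by
  have hd : s.drop k = [] := List.drop_eq_nil_of_le hk
  rw [hd]
  intro h
  exact hp (List.prefix_nil.mp h)

theorem pvFindFrom_none {s pat : List Char} (hp : pat ≠ []) {i : Nat}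
    (h : pvFindFrom s pat i = none) : ∀ k, i ≤ k → ¬ pat <+: s.drop k := by
  induction i using pvFindFrom.induct s pat with
  | case1 i hi =>
      intro k hk
      exact pv_no_prefix_past_end hp (by omega)
  | case2 i hi hpre =>
      rw [pvFindFrom, if_neg hi, if_pos hpre] at h
      exact absurd h (by simp)
  | case3 i hi hpre ih =>
      rw [pvFindFrom, if_neg hi, if_neg hpre] at h
      intro k hk
      rcases Nat.eq_or_lt_of_le hk with rfl | hlt
      · exact fun hc => hpre (List.isPrefixOf_iff_prefix.mpr hc)
      · exact ih h k (by omega)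

theorem pvFindFrom_some {s pat : List Char} {i j : Nat}
    (h : pvFindFrom s pat i = some j) :
    i ≤ j ∧ pat <+: s.drop j ∧ ∀ k, i ≤ k → k < j → ¬ pat <+: s.drop k := by
  induction i using pvFindFrom.induct s pat with
  | case1 i hi =>
      rw [pvFindFrom, if_pos hi] at h
      exact absurd h (by simp)
  | case2 i hi hpre =>
      rw [pvFindFrom, if_neg hi, if_pos hpre] at h
      obtain rfl : i = j := by simpa using h
      exact ⟨le_refl _, List.isPrefixOf_iff_prefix.mp hpre, by omega⟩
  | case3 i hi hpre ih =>
      rw [pvFindFrom, if_neg hi, if_neg hpre] at h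
      obtain ⟨h1, h2, h3⟩ := ih h
      refine ⟨by omega, h2, ?_⟩
      intro k hk hkj
      rcases Nat.eq_or_lt_of_le hk with rfl | hlt
      · exact fun hc => hpre (List.isPrefixOf_iff_prefix.mpr hc)
      · exact h3 k (by omega) hkj

theorem pvLoopA_iff {s pat : List Char} (hp : pat ≠ []) :
    ∀ (fuel i : Nat), s.length + 1 - i ≤ fuel →
    (pvLoopA s pat fuel i = true ↔ ∃ j, i ≤ j ∧ pat <+: s.drop j ∧ pvCondA s j = true) := by
  intro fuel
  induction fuel with
  | zero =>
      intro i hi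
      simp only [pvLoopA, Bool.false_eq_true, false_iff]
      rintro ⟨j, hij, hocc, -⟩
      exact pv_no_prefix_past_end hp (by omega) hocc
  | succ fuel ih =>
      intro i hi
      rw [pvLoopA]
      cases hf : pvFindFrom s pat i with
      | none =>
          simp only [Bool.false_eq_true, false_iff]
          rintro ⟨j, hij, hocc, -⟩
          exact pvFindFrom_none hp hf j hij hocc
      | some j =>
          obtain ⟨hij, hocc, hmin⟩ := pvFindFrom_some hf
          by_cases hc : pvCondA s j = true
          · simp only [hc, if_true, true_iff]
            exact ⟨j, hij, hocc, hc⟩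
          · simp only [hc, if_false, Bool.false_eq_true]
            rw [ih (j + 1) (by omega)]
            constructor
            · rintro ⟨k, hk, hko, hkc⟩
              exact ⟨k, by omega, hko, hkc⟩
            · rintro ⟨k, hk, hko, hkc⟩
              refine ⟨k, ?_, hko, hkc⟩
              rcases Nat.lt_or_ge k j with hlt | hge
              · exact absurd hko (hmin k hk hlt)
              · rcases Nat.eq_or_lt_of_le hge with rfl | h
                · exact absurd hkc hc
                · omega

theorem pvCondA_zero (s : List Char) : pvCondA s 0 = true := by simp [pvCondA]

theorem pvCondA_eq_condB {s : List Char} {j : Nat} (hj : 1 ≤ j) :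
    pvCondA s j = pvCondB s j := by
  rw [pvCondA, pvCondB, if_neg (by omega)]
  by_cases hpc : (s[j-1]? = some '+' || s[j-1]? = some ';') = true
  · simp [hpc]
  · simp only [Bool.not_eq_true] at hpc
    simp [hpc]

-- B as the same existential
theorem pvAlt_iff (ua : String) :
    url_in_ua_py_alt ua = true ↔
      ∃ j, pvHitB ua.toList j = true ∧ pvCondA ua.toList j = true := by
  rw [url_in_ua_py_alt]
  simp only [Bool.or_eq_true, List.any_eq_true, List.mem_range'_1, Bool.and_eq_true]
  constructor
  · rintro (h0 | ⟨j, ⟨hj1, hj2⟩, hcb, hhit⟩)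
    · exact ⟨0, h0, pvCondA_zero _⟩
    · exact ⟨j, hhit, by rw [pvCondA_eq_condB (by omega)]; exact hcb⟩
  · rintro ⟨j, hhit, hcond⟩
    rcases Nat.eq_zero_or_pos j with rfl | hj
    · exact Or.inl hhit
    · have hlt : j < ua.toList.length := by
        rw [pvHitB, Bool.or_eq_true] at hhit
        by_contra hge
        rcases hhit with h | h <;>
          exact pv_no_prefix_past_end (by simp) (by omega)
            (List.isPrefixOf_iff_prefix.mp h)
      exact Or.inr ⟨j, ⟨hj, by omega⟩,
        by rw [← pvCondA_eq_condB hj]; exact hcond, hhit⟩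

theorem pvA_iff (ua : String) :
    url_in_ua_py ua = true ↔
      ∃ j, pvHitB ua.toList j = true ∧ pvCondA ua.toList j = true := by
  rw [url_in_ua_py]
  simp only [List.any_cons, List.any_nil, Bool.or_false, Bool.or_eq_true]
  rw [pvLoopA_iff (by simp) (ua.toList.length + 1) 0 (by omega),
      pvLoopA_iff (by simp) (ua.toList.length + 1) 0 (by omega)]
  constructor
  · rintro (⟨j, -, hocc, hc⟩ | ⟨j, -, hocc, hc⟩)
    · exact ⟨j, by rw [pvHitB]; simp [List.isPrefixOf_iff_prefix, hocc], hc⟩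
    · exact ⟨j, by rw [pvHitB]; simp [List.isPrefixOf_iff_prefix, hocc], hc⟩
  · rintro ⟨j, hhit, hc⟩
    rw [pvHitB, Bool.or_eq_true, List.isPrefixOf_iff_prefix, List.isPrefixOf_iff_prefix] at hhit
    rcases hhit with h | h
    · exact Or.inl ⟨j, Nat.zero_le _, h, hc⟩
    · exact Or.inr ⟨j, Nat.zero_le _, h, hc⟩

theorem pv_a_eq_b (ua : String) : url_in_ua_py ua = url_in_ua_py_alt ua := by
  rw [Bool.eq_iff_iff, pvA_iff, pvAlt_iff]

-- ===== VERDICT (by name: the statement is the Claim_ definition above) =====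
theorem url_in_ua_py_spec : Claim_equal_url_in_ua_py := by
  intro ua _
  exact pv_a_eq_b ua
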